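-- pv_equiv track=rewrite | github.com/yacoublambaz/EECE230PssSpring2022 | may6th.py | hasIsolatedElement
-- ===== SOURCE A (Python) =====
-- def hasIsolatedElement(L):
--     D = {}
--     for elem in L:
--         D[elem] = 0 #value not important
--     for elem in L:
--         if elem-1 not in D and elem+1 not in D:
--             return True
--     return False
-- ===== SOURCE B (Python) =====
-- def hasIsolatedElement(L):
--     u = sorted(set(L))
--     n = len(u)
--     for i in range(n):
--         left = i > 0 and u[i - 1] == u[i] - 1
--         right = i < n - 1 and u[i + 1] == u[i] + 1
--         if not left and not right:
--             return True
--     return False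
-- ===== Notes on version B (the rewrite author's own statement) =====
-- stated objective: alternative
-- what changed: Replaces the dict-membership scan with sort-then-scan: B sorts the distinct values once and decides isolation by comparing each element with its positional neighbours in the sorted array, instead of hashing every value and probing e-1/e+1 per element.
import Mathlib
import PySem

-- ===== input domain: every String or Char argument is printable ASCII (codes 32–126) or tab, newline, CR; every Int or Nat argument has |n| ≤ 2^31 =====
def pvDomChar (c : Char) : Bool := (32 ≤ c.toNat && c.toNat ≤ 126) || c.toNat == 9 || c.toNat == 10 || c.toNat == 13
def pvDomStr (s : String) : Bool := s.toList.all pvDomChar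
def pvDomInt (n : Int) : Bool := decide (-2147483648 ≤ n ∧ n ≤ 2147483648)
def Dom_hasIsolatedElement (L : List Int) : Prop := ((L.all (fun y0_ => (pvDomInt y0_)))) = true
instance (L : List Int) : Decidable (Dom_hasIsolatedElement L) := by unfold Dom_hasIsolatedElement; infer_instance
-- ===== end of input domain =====

-- B replaces A's hash-membership scan by sort-then-scan over the distinct values; alternative decomposition, not faster.

-- ===== PORT A =====
-- first loop of A: D[elem] = 0 for elem in L
def pvBuildD (L : List Int) : PySem.Dict Int Int :=
  L.foldl (fun d e => d.insert e 0) PySem.Dict.empty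

-- second loop of A with its early return
def pvLoopA (D : PySem.Dict Int Int) : List Int → Bool
  | [] => false
  | e :: rest =>
      if (!D.contains (e - 1)) && (!D.contains (e + 1)) then true
      else pvLoopA D rest

def hasIsolatedElement (L : List Int) : Bool :=
  pvLoopA (pvBuildD L) L

-- ===== PORT B =====
-- the body of B's `for i in range(n)` loop condition: not left and not right
def pvCondB (u : List Int) (i : Nat) : Bool :=
  (!(decide (0 < i) && (u.getD (i - 1) 0 == u.getD i 0 - 1))) &&
  (!(decide (i < u.length - 1) && (u.getD (i + 1) 0 == u.getD i 0 + 1)))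

-- B's index loop with its early return
def pvLoopB (u : List Int) (i : Nat) : Bool :=
  if i < u.length then
    (if pvCondB u i then true else pvLoopB u (i + 1))
  else false
termination_by u.length - i

def hasIsolatedElement_alt (L : List Int) : Bool :=
  pvLoopB (PySem.List.sorted (PySem.Set.ofList L) (fun x => x) false) 0

-- ===== PRECONDITION & SPEC =====
def Spec_hasIsolatedElement (L : List Int) (out : Bool) : Prop := out = hasIsolatedElement_alt L
instance (L : List Int) (out : Bool) : Decidable (Spec_hasIsolatedElement L out) := by unfold Spec_hasIsolatedElement; infer_instance

-- ===== CLAIM (what is proved, stated in full; the proofs are below) =====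
def Claim_equal_hasIsolatedElement : Prop := ∀ (L : List Int), Dom_hasIsolatedElement L → Spec_hasIsolatedElement L (hasIsolatedElement L)

-- ===== LEMMAS AND PROOFS =====

-- A's dict membership is list membership
theorem pvBuildD_contains (L : List Int) (x : Int) :
    (pvBuildD L).contains x = decide (x ∈ L) := by
  have hk : (pvBuildD L).keys = PySem.Set.update (PySem.Dict.empty (κ := Int) (ν := Int)).keys L := by
    simpa [pvBuildD] using
      PySem.Dict.keys_foldl_insert (d := (PySem.Dict.empty : PySem.Dict Int Int))
        (l := L) (f := fun _ _ => (0 : Int))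
  rw [PySem.Dict.contains_eq_decide_mem_keys, hk]
  simp [PySem.Dict.keys_empty, PySem.Set.update_nil_left, PySem.Set.mem_ofList]

-- A's scan is an existential
theorem pvLoopA_eq (D : PySem.Dict Int Int) (M : List Int) :
    pvLoopA D M = true ↔ ∃ e ∈ M, D.contains (e - 1) = false ∧ D.contains (e + 1) = false := by
  induction M with
  | nil => simp [pvLoopA]
  | cons e rest ih =>
      by_cases h : ((!D.contains (e - 1)) && (!D.contains (e + 1))) = true
      · simp only [pvLoopA, h, if_true]
        simp only [Bool.and_eq_true, Bool.not_eq_true'] at h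
        simp [h.1, h.2]
      · simp only [pvLoopA, if_neg h, ih]
        simp only [Bool.and_eq_true, Bool.not_eq_true', Classical.not_and_iff_not_or_not] at h
        constructor
        · rintro ⟨x, hx, hc⟩; exact ⟨x, List.mem_cons_of_mem _ hx, hc⟩
        · rintro ⟨x, hx, hc⟩
          rcases List.mem_cons.mp hx with rfl | hx
          · rcases h with h | h <;> rw [hc.1] at * <;> rw [hc.2] at * <;> simp_all
          · exact ⟨x, hx, hc⟩

theorem hasIsolatedElement_iff (L : List Int) :
    hasIsolatedElement L = true ↔ ∃ e ∈ L, (e - 1) ∉ L ∧ (e + 1) ∉ L := by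
  rw [hasIsolatedElement, pvLoopA_eq]
  refine exists_congr fun e => and_congr_right fun _ => ?_
  rw [pvBuildD_contains, pvBuildD_contains]
  simp

-- B's scan is an existential over indices ≥ i
theorem pvLoopB_eq (u : List Int) (i : Nat) :
    pvLoopB u i = true ↔ ∃ j, i ≤ j ∧ j < u.length ∧ pvCondB u j = true := by
  by_cases h : i < u.length
  · rw [pvLoopB, if_pos h]
    by_cases hc : pvCondB u i = true
    · rw [if_pos hc]
      exact ⟨fun _ => ⟨i, le_refl i, h, hc⟩, fun _ => rfl⟩
    · rw [if_neg hc, pvLoopB_eq u (i + 1)]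
      constructor
      · rintro ⟨j, hij, hj, hcj⟩; exact ⟨j, Nat.le_of_succ_le hij, hj, hcj⟩
      · rintro ⟨j, hij, hj, hcj⟩
        refine ⟨j, ?_, hj, hcj⟩
        rcases Nat.lt_or_ge i j with hlt | hge
        · exact hlt
        · have : j = i := Nat.le_antisymm hge hij
          subst this; exact absurd hcj hc
  · rw [pvLoopB, if_neg h]
    refine ⟨fun hf => absurd hf (by simp), ?_⟩
    rintro ⟨j, hij, hj, _⟩
    exact absurd (Nat.lt_of_le_of_lt hij hj) h
termination_by u.length - i

-- in a strictly increasing list, x-1 is present iff it sits at the previous index (and dually)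
theorem pvCondB_iff (u : List Int) (hs : u.Pairwise (· < ·)) (i : Nat) (hi : i < u.length) :
    pvCondB u i = true ↔ (u[i] - 1) ∉ u ∧ (u[i] + 1) ∉ u := by
  have hmono : ∀ (p q : Nat) (hp : p < u.length) (hq : q < u.length), p < q → u[p] < u[q] :=
    fun p q hp hq hpq => (List.pairwise_iff_getElem.mp hs) p q hp hq hpq
  have hgd : u.getD i 0 = u[i] := List.getD_eq_getElem u 0 hi
  constructor
  · intro hc
    simp only [pvCondB, Bool.and_eq_true, Bool.not_eq_true', Bool.and_eq_false_iff,
      decide_eq_false_iff_not, beq_eq_false_iff_ne, ne_eq, hgd] at hc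
    obtain ⟨hl, hr⟩ := hc
    constructor
    · intro hmem
      obtain ⟨k, hk, hke⟩ := List.getElem_of_mem hmem
      have hki : k < i := by
        by_contra hge
        rcases Nat.lt_or_ge i k with hik | hle
        · have := hmono i k hi hk hik; omega
        · have : k = i := by omega
          subst this; omega
      have hk1 : k = i - 1 := by
        by_contra hne
        have hklt : k < i - 1 := by omega
        have hi1 : i - 1 < u.length := by omega
        have h1 := hmono k (i - 1) hk hi1 hklt
        have h2 := hmono (i - 1) i hi1 hi (by omega)
        omega
      subst hk1
      have h0i : 0 < i := by omega
      rcases hl with hl | hl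
      · omega
      · exact hl (by rw [List.getD_eq_getElem u 0 (by omega)]; omega)
    · intro hmem
      obtain ⟨k, hk, hke⟩ := List.getElem_of_mem hmem
      have hki : i < k := by
        by_contra hge
        rcases Nat.lt_or_ge k i with hik | hle
        · have := hmono k i hk hi hik; omega
        · have : k = i := by omega
          subst this; omega
      have hk1 : k = i + 1 := by
        by_contra hne
        have hklt : i + 1 < k := by omega
        have h1 := hmono (i + 1) k (by omega) hk hklt
        have h2 := hmono i (i + 1) hi (by omega) (by omega)
        omega
      subst hk1
      rcases hr with hr | hr
      · omega
      · exact hr (by rw [List.getD_eq_getElem u 0 hk]; omega)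
  · rintro ⟨hl, hr⟩
    simp only [pvCondB, Bool.and_eq_true, Bool.not_eq_true', Bool.and_eq_false_iff,
      decide_eq_false_iff_not, beq_eq_false_iff_ne, ne_eq, hgd]
    constructor
    · by_cases h0 : 0 < i
      · right
        intro he
        apply hl
        rw [List.getD_eq_getElem u 0 (show i - 1 < u.length by omega)] at he
        rw [← he]
        exact List.getElem_mem _
      · left; omega
    · by_cases h0 : i < u.length - 1
      · right
        intro he
        apply hr
        rw [List.getD_eq_getElem u 0 (show i + 1 < u.length by omega)] at he
        rw [← he]
        exact List.getElem_mem _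
      · left; omega

theorem hasIsolatedElement_alt_iff (L : List Int) :
    hasIsolatedElement_alt L = true ↔ ∃ e ∈ L, (e - 1) ∉ L ∧ (e + 1) ∉ L := by
  set u := PySem.List.sorted (PySem.Set.ofList L) (fun x => x) false with hu
  have hs : u.Pairwise (· < ·) := PySem.List.sorted_ofList_pairwise_lt L
  have hmem : ∀ x : Int, x ∈ u ↔ x ∈ L := by
    intro x
    rw [hu, PySem.List.mem_sorted, PySem.Set.mem_ofList]
  rw [hasIsolatedElement_alt, ← hu, pvLoopB_eq]
  constructor
  · rintro ⟨j, -, hj, hc⟩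
    have := (pvCondB_iff u hs j hj).mp hc
    exact ⟨u[j], (hmem _).mp (List.getElem_mem _),
      fun h => this.1 ((hmem _).mpr h), fun h => this.2 ((hmem _).mpr h)⟩
  · rintro ⟨e, he, h1, h2⟩
    obtain ⟨j, hj, hje⟩ := List.getElem_of_mem ((hmem e).mpr he)
    refine ⟨j, Nat.zero_le j, hj, (pvCondB_iff u hs j hj).mpr ?_⟩
    rw [hje]
    exact ⟨fun h => h1 ((hmem _).mp h), fun h => h2 ((hmem _).mp h)⟩

-- ===== VERDICT (by name: the statement is the Claim_ definition above) =====
theorem hasIsolatedElement_spec : Claim_equal_hasIsolatedElement := by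
  intro L _
  unfold Spec_hasIsolatedElement
  rcases hb : hasIsolatedElement_alt L with _ | _
  · rcases ha : hasIsolatedElement L with _ | _
    · rfl
    · exact absurd ((hasIsolatedElement_alt_iff L).mpr ((hasIsolatedElement_iff L).mp ha))
        (by simp [hb])
  · exact (hasIsolatedElement_iff L).mpr ((hasIsolatedElement_alt_iff L).mp hb)
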